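-- pv_equiv track=rewrite | github.com/SeeunChoi1/ProblemSolving | exercise/baekjoon/문자열/가르침.py | readable
-- ===== SOURCE A (Python) =====
-- pre = 'anta'
--
-- post = 'tica'
--
-- def readable(word, must_alph):
--     flag = True
--     word = word[len(pre):-len(post)]
--     for w in word:
--         if w not in must_alph:
--             flag = False
--             break
--     return flag
-- ===== SOURCE B (Python) =====
-- pre = 'anta'
--
-- post = 'tica'
--
-- def readable(word, must_alph):
--     mid = word[len(pre):-len(post)]
--     freq = {}
--     for c in mid:
--         freq[c] = freq.get(c, 0) + 1
--     return len(mid) == sum(n for c, n in freq.items() if c in must_alph)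
-- ===== Notes on version B (the rewrite author's own statement) =====
-- stated objective: alternative
-- what changed: Replaces A's boolean scan with early break by building a character-frequency histogram of the middle slice and comparing the total count of allowed characters with the slice length.
import Mathlib
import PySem

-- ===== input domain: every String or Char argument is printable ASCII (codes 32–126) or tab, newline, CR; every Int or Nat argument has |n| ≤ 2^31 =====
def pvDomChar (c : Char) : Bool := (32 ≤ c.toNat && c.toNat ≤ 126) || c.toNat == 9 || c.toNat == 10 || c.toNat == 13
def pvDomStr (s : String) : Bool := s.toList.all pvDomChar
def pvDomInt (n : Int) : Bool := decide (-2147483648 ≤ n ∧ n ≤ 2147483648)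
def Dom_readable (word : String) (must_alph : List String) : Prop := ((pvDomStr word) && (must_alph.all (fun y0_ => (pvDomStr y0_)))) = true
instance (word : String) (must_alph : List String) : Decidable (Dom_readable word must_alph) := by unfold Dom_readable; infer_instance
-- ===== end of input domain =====

-- B replaces A's boolean scan with early break by a character-frequency histogram of the middle
-- slice, returning whether the allowed characters' counts sum to the slice's length (alternative).


-- ===== PORT A =====
def pvPre : String := "anta"
def pvPost : String := "tica"

-- the 'for w in word: if w not in must_alph: flag = False; break' loop, flag threaded as the result
def readLoopA (must_alph : List String) : List Char → Bool
  | [] => true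
  | c :: cs => if !(must_alph.contains (String.ofList [c])) then false else readLoopA must_alph cs

def readable (word : String) (must_alph : List String) : Bool :=
  let word' := PySem.Str.slice word (some (PySem.Str.len pvPre)) (some (-(PySem.Str.len pvPost)))
  readLoopA must_alph word'.toList

-- ===== PORT B =====
def readable_alt (word : String) (must_alph : List String) : Bool :=
  let mid := PySem.Str.slice word (some (PySem.Str.len pvPre)) (some (-(PySem.Str.len pvPost)))
  -- 'freq = {}; for c in mid: freq[c] = freq.get(c, 0) + 1'
  let freq : PySem.Dict Char Int :=
    mid.toList.foldl (fun d c => d.insert c (d.getD c 0 + 1)) PySem.Dict.empty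
  -- 'sum(n for c, n in freq.items() if c in must_alph)'
  let s : Int := freq.items.foldl
    (fun acc kv => if must_alph.contains (String.ofList [kv.1]) then acc + kv.2 else acc) 0
  decide ((PySem.Str.len mid : Int) = s)

-- ===== PRECONDITION & SPEC =====
def Spec_readable (word : String) (must_alph : List String) (out : Bool) : Prop := out = readable_alt word must_alph
instance (word : String) (must_alph : List String) (out : Bool) : Decidable (Spec_readable word must_alph out) := by unfold Spec_readable; infer_instance

-- ===== CLAIM (what is proved, stated in full; the proofs are below) =====
def Claim_equal_readable : Prop := ∀ (word : String) (must_alph : List String), Dom_readable word must_alph → Spec_readable word must_alph (readable word must_alph)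

-- ===== LEMMAS AND PROOFS =====

-- A's loop is an 'all' over the characters
theorem readLoopA_eq_all (m : List String) (l : List Char) :
    readLoopA m l = l.all (fun c => m.contains (String.ofList [c])) := by
  induction l with
  | nil => rfl
  | cons c cs ih =>
    simp only [readLoopA, List.all_cons, ih]
    cases m.contains (String.ofList [c]) <;> simp

-- the conditional-sum foldl is the sum over the filtered, mapped list
theorem foldl_if_add (p : Char → Bool) (f : Char → Int) (l : List Char) (a : Int) :
    (l.foldl (fun acc k => if p k then acc + f k else acc) a)
      = a + ((l.filter p).map f).sum := by
  induction l generalizing a with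
  | nil => simp
  | cons c cs ih =>
    simp only [List.foldl_cons, List.filter_cons]
    by_cases h : p c <;> simp [h, ih, add_assoc]

-- first-occurrence distinct list is a permutation of Mathlib's dedup
theorem ofList_perm_dedup (l : List Char) : (PySem.Set.ofList l).Perm l.dedup := by
  rw [List.perm_iff_count]
  intro c
  rcases em (c ∈ l) with h | h
  · rw [List.count_eq_one_of_mem (PySem.Set.nodup_ofList l) ((PySem.Set.mem_ofList l c).mpr h),
      List.count_eq_one_of_mem l.nodup_dedup (List.mem_dedup.mpr h)]
  · rw [List.count_eq_zero.mpr (fun hc => h ((PySem.Set.mem_ofList l c).mp hc)),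
      List.count_eq_zero.mpr (fun hc => h (List.mem_dedup.mp hc))]

-- summing the histogram's counts over the allowed distinct characters counts the allowed positions
theorem sum_counts_eq_countP (p : Char → Bool) (l : List Char) :
    (((PySem.Set.ofList l).filter p).map (fun k => (l.count k : Int))).sum = (l.countP p : Int) := by
  have hperm : (((PySem.Set.ofList l).filter p).map (fun k => (l.count k : Int))).Perm
      ((l.dedup.filter p).map (fun k => (l.count k : Int))) :=
    ((ofList_perm_dedup l).filter p).map _
  rw [hperm.sum_eq, ← List.sum_map_count_dedup_filter_eq_countP p l, Nat.cast_list_sum,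
    List.map_map]
  rfl

-- 'all characters allowed' is 'the allowed positions count to the length'
theorem all_iff_countP_eq_length (p : Char → Bool) (l : List Char) :
    l.all p = decide ((l.length : Int) = (l.countP p : Int)) := by
  rcases em (l.all p = true) with h | h
  · rw [h, eq_comm, decide_eq_true_eq, Nat.cast_inj]
    exact (List.countP_eq_length.mpr (by simpa [List.all_eq_true] using h)).symm
  · have hlt : l.countP p < l.length := by
      rcases Nat.lt_or_ge (l.countP p) l.length with h' | h'
      · exact h'
      · have heq := List.countP_eq_length.mp (Nat.le_antisymm List.countP_le_length h')
        exact absurd (by simpa [List.all_eq_true] using heq) h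
    simp only [Bool.not_eq_true] at h
    rw [h, eq_comm, decide_eq_false_iff_not]
    intro hc
    omega

-- ===== VERDICT (by name: the statement is the Claim_ definition above) =====
theorem readable_spec : Claim_equal_readable := by
  intro word must_alph _
  show readable word must_alph = readable_alt word must_alph
  simp only [readable, readable_alt]
  rw [PySem.Dict.foldl_insert_getD_add_one_eq_counter, PySem.Dict.items_counter,
    readLoopA_eq_all, List.foldl_map, foldl_if_add, zero_add]
  rw [sum_counts_eq_countP, all_iff_countP_eq_length]
  simp [PySem.Str.len_eq]
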